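-- pv_equiv track=rewrite | github.com/DaisyMusser/Avent-of-Code | 2015/22/08/02.py | encoded_length_difference
-- ===== SOURCE A (Python) =====
-- def encoded_length_difference(lines):
--     original_total = 0
--     encoded_total = 0
--
--     for line in lines:
--         original_total += len(line)
--         # Encode by adding 2 for the outer quotes, replacing \ and " with \\ and \"
--         encoded_line = '"' + line.replace('\\', '\\\\').replace('"', '\\"') + '"'
--         encoded_total += len(encoded_line)
--
--     return encoded_total - original_total
-- ===== SOURCE B (Python) =====
-- def encoded_length_difference(lines):
--     # Each encoded line grows by 2 (outer quotes) plus one per escaped character.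
--     return sum(2 + line.count('\\') + line.count('"') for line in lines)
-- ===== Notes on version B (the rewrite author's own statement) =====
-- stated objective: simpler
-- what changed: Instead of building each encoded string with two .replace() calls and measuring both lengths in two running totals, B computes each line's length delta arithmetically (2 + count of backslashes + count of quotes) and sums it directly.
import Mathlib
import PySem

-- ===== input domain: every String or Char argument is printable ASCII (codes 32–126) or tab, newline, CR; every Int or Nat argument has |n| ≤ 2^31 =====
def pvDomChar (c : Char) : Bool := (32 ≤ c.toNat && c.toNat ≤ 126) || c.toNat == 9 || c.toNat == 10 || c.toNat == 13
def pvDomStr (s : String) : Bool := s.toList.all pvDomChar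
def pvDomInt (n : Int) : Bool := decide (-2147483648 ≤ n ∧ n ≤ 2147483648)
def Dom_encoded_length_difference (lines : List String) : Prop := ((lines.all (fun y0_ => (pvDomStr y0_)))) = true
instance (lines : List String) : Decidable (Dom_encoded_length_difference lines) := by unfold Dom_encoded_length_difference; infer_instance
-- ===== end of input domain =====

-- B replaces A's build-the-encoded-string-and-measure loop by a direct arithmetic sum
-- (2 + backslash count + quote count per line); objective: simpler, same cost.

-- ===== PORT A =====
-- literal transliteration: two running totals, encoded line built with two replaces and outer quotes
def encoded_length_difference (lines : List String) : Int :=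
  let st := lines.foldl
    (fun (p : Int × Int) line =>
      let encoded_line := "\"" ++ (PySem.Str.replace (PySem.Str.replace line "\\" "\\\\") "\"" "\\\"") ++ "\""
      (p.1 + PySem.Str.len line, p.2 + PySem.Str.len encoded_line))
    (0, 0)
  st.2 - st.1

-- ===== PORT B =====
def encoded_length_difference_alt (lines : List String) : Int :=
  lines.foldl (fun acc line => acc + (2 + (PySem.Str.count line "\\" : Int) + (PySem.Str.count line "\"" : Int))) 0

-- ===== PRECONDITION & SPEC =====
def Spec_encoded_length_difference (lines : List String) (out : Int) : Prop := out = encoded_length_difference_alt lines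
instance (lines : List String) (out : Int) : Decidable (Spec_encoded_length_difference lines out) := by unfold Spec_encoded_length_difference; infer_instance

-- ===== CLAIM (what is proved, stated in full; the proofs are below) =====
def Claim_equal_encoded_length_difference : Prop := ∀ (lines : List String), Dom_encoded_length_difference lines → Spec_encoded_length_difference lines (encoded_length_difference lines)

-- ===== LEMMAS AND PROOFS =====

-- single-character replace characterised as a flatMap
theorem replace_go_single (o : Char) (new : List Char) :
    ∀ (fuel : Nat) (l acc : List Char), l.length ≤ fuel →
      PySem.Chars.replace.go [o] new fuel l acc
        = acc.reverse ++ l.flatMap (fun c => if c = o then new else [c]) := by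
  intro fuel
  induction fuel with
  | zero =>
    intro l acc h
    have : l = [] := List.eq_nil_of_length_eq_zero (Nat.le_zero.mp h)
    subst this
    simp [PySem.Chars.replace.go]
  | succ n ih =>
    intro l acc h
    cases l with
    | nil => simp [PySem.Chars.replace.go]
    | cons c t =>
      by_cases hc : c = o
      · subst hc
        have hp : [c].isPrefixOf (c :: t) = true := by simp [List.isPrefixOf]
        have hd : List.drop [c].length (c :: t) = t := by simp
        simp only [PySem.Chars.replace.go, hp, if_true]
        rw [hd, ih t _ (by simpa using Nat.le_of_succ_le_succ h)]
        simp [List.flatMap_cons]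
      · have hp : [o].isPrefixOf (c :: t) = false := by
          simp [List.isPrefixOf]
          intro hoc
          exact hc hoc.symm
        simp only [PySem.Chars.replace.go, hp, Bool.false_eq_true, if_false]
        rw [ih t _ (by simpa using Nat.le_of_succ_le_succ h)]
        simp [List.flatMap_cons, if_neg hc]

theorem replace_single (o : Char) (new s : List Char) :
    PySem.Chars.replace s [o] new = s.flatMap (fun c => if c = o then new else [c]) := by
  unfold PySem.Chars.replace
  simp only [List.isEmpty_cons, Bool.false_eq_true, if_false]
  rw [replace_go_single o new s.length s [] (le_refl _)]
  simp

-- single-character count is List.count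
theorem count_go_single (o : Char) :
    ∀ (fuel : Nat) (l : List Char) (acc : Nat), l.length ≤ fuel →
      PySem.Chars.count.go [o] fuel l acc = acc + l.count o := by
  intro fuel
  induction fuel with
  | zero =>
    intro l acc h
    have : l = [] := List.eq_nil_of_length_eq_zero (Nat.le_zero.mp h)
    subst this
    simp [PySem.Chars.count.go]
  | succ n ih =>
    intro l acc h
    cases l with
    | nil => simp [PySem.Chars.count.go]
    | cons c t =>
      by_cases hc : c = o
      · subst hc
        have hp : [c].isPrefixOf (c :: t) = true := by simp [List.isPrefixOf]
        have hd : List.drop [c].length (c :: t) = t := by simp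
        simp only [PySem.Chars.count.go, hp, if_true]
        rw [hd, ih t _ (by simpa using Nat.le_of_succ_le_succ h)]
        simp
        omega
      · have hp : [o].isPrefixOf (c :: t) = false := by
          simp [List.isPrefixOf]
          intro hoc
          exact hc hoc.symm
        simp only [PySem.Chars.count.go, hp, Bool.false_eq_true, if_false]
        rw [ih t _ (by simpa using Nat.le_of_succ_le_succ h)]
        simp [List.count_cons]
        omega

theorem count_single (o : Char) (s : List Char) :
    PySem.Chars.count s [o] = s.count o := by
  unfold PySem.Chars.count
  simp only [List.isEmpty_cons, Bool.false_eq_true, if_false]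
  rw [count_go_single o s.length s 0 (le_refl _)]
  omega

-- length of the single-char replace with a two-char replacement
theorem length_flatMap_two (o a b : Char) (s : List Char) :
    (s.flatMap (fun c => if c = o then [a, b] else [c])).length = s.length + s.count o := by
  induction s with
  | nil => simp
  | cons c t ih =>
    simp only [List.flatMap_cons, List.length_append, ih, List.length_cons, List.count_cons]
    by_cases hc : c = o
    · simp [hc]; omega
    · simp [if_neg hc]; omega

-- replacing '\' by "\\" does not change the number of '"'
theorem count_quote_after_bs (s : List Char) :
    (s.flatMap (fun c => if c = '\\' then ['\\', '\\'] else [c])).count '"' = s.count '"' := by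
  induction s with
  | nil => simp
  | cons c t ih =>
    simp only [List.flatMap_cons, List.count_append, ih, List.count_cons]
    by_cases hc : c = '\\'
    · simp [hc]
    · simp only [if_neg hc, List.count_cons, List.count_nil]
      by_cases hq : c = '"'
      · simp [hq]; omega
      · simp [hq]

-- per-line delta
theorem line_delta (line : String) :
    PySem.Str.len ("\"" ++ (PySem.Str.replace (PySem.Str.replace line "\\" "\\\\") "\"" "\\\"") ++ "\"")
      - PySem.Str.len line
    = 2 + (PySem.Str.count line "\\" : Int) + (PySem.Str.count line "\"" : Int) := by
  simp only [PySem.Str.len, PySem.Str.replace, PySem.Str.count, String.toList_append]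
  have hq : ("\"" : String).toList = ['"'] := rfl
  have hb : ("\\" : String).toList = ['\\'] := rfl
  have hbb : ("\\\\" : String).toList = ['\\', '\\'] := rfl
  have hbq : ("\\\"" : String).toList = ['\\', '"'] := rfl
  rw [hq, hb, hbb, hbq]
  rw [String.toList_ofList]
  rw [replace_single, replace_single, count_single, count_single]
  simp only [String.toList_ofList]
  simp only [List.length_append, List.length_cons, List.length_nil]
  rw [length_flatMap_two, length_flatMap_two, count_quote_after_bs]
  push_cast
  ring

-- shifting the accumulator of B's fold
theorem foldB_shift (f : String → Int) (lines : List String) :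
    ∀ (s : Int), lines.foldl (fun a x => a + f x) s = s + lines.foldl (fun a x => a + f x) 0 := by
  induction lines with
  | nil => intro s; simp
  | cons x t ih =>
    intro s
    simp only [List.foldl_cons]
    rw [ih, ih (0 + f x)]
    ring

-- fold invariant
theorem fold_invariant (lines : List String) :
    ∀ (o e : Int),
      (let st := lines.foldl
        (fun (p : Int × Int) line =>
          let encoded_line := "\"" ++ (PySem.Str.replace (PySem.Str.replace line "\\" "\\\\") "\"" "\\\"") ++ "\""
          (p.1 + PySem.Str.len line, p.2 + PySem.Str.len encoded_line))
        (o, e)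
       st.2 - st.1)
      = e - o + lines.foldl (fun acc line => acc + (2 + (PySem.Str.count line "\\" : Int) + (PySem.Str.count line "\"" : Int))) 0 := by
  induction lines with
  | nil => intro o e; simp
  | cons line rest ih =>
    intro o e
    simp only [List.foldl_cons]
    rw [ih]
    rw [foldB_shift (fun line => 2 + (PySem.Str.count line "\\" : Int) + (PySem.Str.count line "\"" : Int)) rest
          (0 + (2 + (PySem.Str.count line "\\" : Int) + (PySem.Str.count line "\"" : Int)))]
    have := line_delta line
    omega

-- ===== VERDICT (by name: the statement is the Claim_ definition above) =====
theorem encoded_length_difference_spec : Claim_equal_encoded_length_difference := by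
  intro lines _
  unfold Spec_encoded_length_difference encoded_length_difference encoded_length_difference_alt
  have := fold_invariant lines 0 0
  simpa using this
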